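-- pv_equiv track=rewrite | github.com/DavidReis23/Reposit-rio_IA | RedesNeuraisArtificiais/NeuraisArtificiais.py | treinar_hebb
-- ===== SOURCE A (Python) =====
-- def treinar_hebb(entradas, targets):
--     pesos = [0, 0, 0]
--     bias = 0
--
--     # Passa por todas as linhas da tabela (Batch)
--     for i in range(len(entradas)):
--         x = entradas[i]
--         t = targets[i]
--
--         # Atualiza pesos: w_novo = w_atual + (x * target)
--         # Como o peso inicial é 0, basta somar x*t
--         pesos[0] += x[0] * t
--         pesos[1] += x[1] * t
--         pesos[2] += x[2] * t
--
--         # Atualiza bias: b_novo = b_atual + target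
--         bias += t
--
--     return pesos, bias
-- ===== SOURCE B (Python) =====
-- def treinar_hebb(entradas, targets):
--     # Recursive Hebb rule: pair each row with its target, then fold the pair
--     # list back-to-front by structural recursion.
--     def hebb(pares):
--         if not pares:
--             return [0, 0, 0], 0
--         (x, t) = pares[0]
--         pesos, bias = hebb(pares[1:])
--         return [pesos[0] + x[0] * t, pesos[1] + x[1] * t, pesos[2] + x[2] * t], bias + t
--     return hebb([(entradas[i], targets[i]) for i in range(len(entradas))])
-- ===== Notes on version B (the rewrite author's own statement) =====
-- stated objective: alternative
-- what changed: A's iterative index loop mutating a weight list and a bias in place is replaced by a structural recursion: the rows are first paired with their targets, then a recursive helper folds the pair list back-to-front, combining each row into the recursively computed result.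
import Mathlib
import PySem

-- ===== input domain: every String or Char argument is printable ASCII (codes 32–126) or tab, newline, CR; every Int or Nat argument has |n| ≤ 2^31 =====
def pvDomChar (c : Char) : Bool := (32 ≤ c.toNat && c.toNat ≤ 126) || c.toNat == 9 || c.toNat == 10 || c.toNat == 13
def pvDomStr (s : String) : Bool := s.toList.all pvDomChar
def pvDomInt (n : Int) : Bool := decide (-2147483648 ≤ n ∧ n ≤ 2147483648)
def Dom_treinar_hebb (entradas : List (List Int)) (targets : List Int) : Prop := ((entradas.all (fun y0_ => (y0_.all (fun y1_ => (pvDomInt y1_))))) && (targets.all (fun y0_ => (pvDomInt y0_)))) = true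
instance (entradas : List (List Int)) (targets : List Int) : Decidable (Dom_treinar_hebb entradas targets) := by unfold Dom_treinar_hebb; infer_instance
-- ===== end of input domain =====

-- B replaces A's iterative index loop with in-place mutation by a structural recursion over the
-- zipped (row, target) pairs, combining each row into the recursive result back-to-front.

-- ===== PORT A =====
-- A's loop carries (pesos[0], pesos[1], pesos[2], bias) as a 4-tuple; indexing via pyGet? with
-- getD 0/[] is exact on Pre_ (where all accesses are in range).
def treinar_hebb (entradas : List (List Int)) (targets : List Int) : List Int × Int :=
  let s := (List.range entradas.length).foldl
    (fun (s : Int × Int × Int × Int) i =>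
      let x := (PySem.List.pyGet? entradas (i : Int)).getD []
      let t := (PySem.List.pyGet? targets (i : Int)).getD 0
      (s.1 + ((PySem.List.pyGet? x 0).getD 0) * t,
       s.2.1 + ((PySem.List.pyGet? x 1).getD 0) * t,
       s.2.2.1 + ((PySem.List.pyGet? x 2).getD 0) * t,
       s.2.2.2 + t))
    (0, 0, 0, 0)
  ([s.1, s.2.1, s.2.2.1], s.2.2.2)

-- ===== PORT B =====
-- Helper `hebb` of Source B: structural recursion on the list of (row, target) pairs.
def hebbRec : List (List Int × Int) → List Int × Int
  | [] => ([0, 0, 0], 0)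
  | (x, t) :: resto =>
    let r := hebbRec resto
    ([(PySem.List.pyGet? r.1 0).getD 0 + ((PySem.List.pyGet? x 0).getD 0) * t,
      (PySem.List.pyGet? r.1 1).getD 0 + ((PySem.List.pyGet? x 1).getD 0) * t,
      (PySem.List.pyGet? r.1 2).getD 0 + ((PySem.List.pyGet? x 2).getD 0) * t],
     r.2 + t)

def treinar_hebb_alt (entradas : List (List Int)) (targets : List Int) : List Int × Int :=
  hebbRec ((List.range entradas.length).map
    (fun (a : Nat) => ((PySem.List.pyGet? entradas (a : Int)).getD [],
                       (PySem.List.pyGet? targets (a : Int)).getD 0)))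

-- ===== PRECONDITION & SPEC =====
-- Pre_ excludes exactly the inputs where the Python A raises IndexError:
-- targets shorter than entradas, or some row with fewer than 3 entries.
def Pre_treinar_hebb (entradas : List (List Int)) (targets : List Int) : Prop :=
  entradas.length ≤ targets.length ∧ ∀ x ∈ entradas, 3 ≤ x.length
instance (entradas : List (List Int)) (targets : List Int) : Decidable (Pre_treinar_hebb entradas targets) := by unfold Pre_treinar_hebb; infer_instance
def pvWitness_treinar_hebb : List (List Int) × List Int := ([[1, 2, 3], [4, 5, 6]], [1, -1])

def Spec_treinar_hebb (entradas : List (List Int)) (targets : List Int) (out : List Int × Int) : Prop := out = treinar_hebb_alt entradas targets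
instance (entradas : List (List Int)) (targets : List Int) (out : List Int × Int) : Decidable (Spec_treinar_hebb entradas targets out) := by unfold Spec_treinar_hebb; infer_instance

-- ===== CLAIM =====
def Claim_equal_treinar_hebb : Prop := ∀ (entradas : List (List Int)) (targets : List Int), Dom_treinar_hebb entradas targets → Pre_treinar_hebb entradas targets → Spec_treinar_hebb entradas targets (treinar_hebb entradas targets)

-- ===== LEMMAS AND PROOFS =====

-- On rows with at least 3 entries, Python x[j] (j = 0,1,2) is getD.
lemma pyGet_row (x : List Int) (hx : 3 ≤ x.length) :
    (PySem.List.pyGet? x 0).getD 0 = x.getD 0 0 ∧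
    (PySem.List.pyGet? x 1).getD 0 = x.getD 1 0 ∧
    (PySem.List.pyGet? x 2).getD 0 = x.getD 2 0 := by
  match x, hx with
  | x0 :: x1 :: x2 :: xs, _ =>
    refine ⟨?_, ?_, ?_⟩ <;>
      (simp [PySem.List.pyGet?, PySem.List.pyIdx?, List.getD]; rw [if_pos (by omega)]; simp)

-- Characterisation of B's recursion as three column sums plus a target sum,
-- valid when every row has at least 3 entries.
lemma hebbRec_char (L : List (List Int × Int)) (h : ∀ p ∈ L, 3 ≤ p.1.length) :
    hebbRec L =
      ([(L.map (fun p => (p.1.getD 0 0) * p.2)).sum,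
        (L.map (fun p => (p.1.getD 1 0) * p.2)).sum,
        (L.map (fun p => (p.1.getD 2 0) * p.2)).sum],
       (L.map (fun p => p.2)).sum) := by
  induction L with
  | nil => simp [hebbRec]
  | cons p ps ih =>
    obtain ⟨x, t⟩ := p
    have hx : 3 ≤ x.length := h (x, t) (List.mem_cons_self ..)
    obtain ⟨h0, h1, h2⟩ := pyGet_row x hx
    have ih' := ih (fun q hq => h q (List.mem_cons_of_mem _ hq))
    simp only [hebbRec, ih', h0, h1, h2, List.map_cons, List.sum_cons]
    simp [PySem.List.pyGet?, PySem.List.pyIdx?, add_comm]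

-- A fold carrying four independent additive components splits into four map-sums.
lemma quad_foldl_split_gen {a b c d : Int} (f g h k : Int → Int) (l : List Int) :
    l.foldl
      (fun (s : Int × Int × Int × Int) i =>
        (s.1 + f i, s.2.1 + g i, s.2.2.1 + h i, s.2.2.2 + k i)) (a, b, c, d)
    = (a + (l.map f).sum, b + (l.map g).sum, c + (l.map h).sum, d + (l.map k).sum) := by
  induction l generalizing a b c d with
  | nil => simp
  | cons y ys ih => simp [List.foldl, ih]; omega

-- Under Pre_, a map over range(len entradas) of a function of entradas[i], targets[i]
-- is the corresponding map over the zip.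
lemma map_range_eq_map_zip {β : Type} (F : List Int → Int → β)
    (entradas : List (List Int)) (targets : List Int)
    (hlen : entradas.length ≤ targets.length) :
    (List.range entradas.length).map
      (fun (a : Nat) => F ((PySem.List.pyGet? entradas (a : Int)).getD [])
                  ((PySem.List.pyGet? targets (a : Int)).getD 0))
    = (entradas.zip targets).map (fun p => F p.1 p.2) := by
  apply List.ext_getElem
  · simp [List.length_zip]; omega
  · intro i h1 h2
    have hi : i < entradas.length := by simpa using h1
    have hit : i < targets.length := lt_of_lt_of_le hi hlen
    simp only [List.getElem_map, List.getElem_range, List.getElem_zip]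
    simp [hi, hit]

-- ===== VERDICT =====
theorem treinar_hebb_spec : Claim_equal_treinar_hebb := by
  intro entradas targets _ hpre
  obtain ⟨hlen, hrows⟩ := hpre
  show treinar_hebb entradas targets = treinar_hebb_alt entradas targets
  have hz : ∀ p ∈ entradas.zip targets, 3 ≤ p.1.length := by
    intro p hp
    exact hrows p.1 (List.of_mem_zip (by exact hp)).1
  rw [treinar_hebb_alt, map_range_eq_map_zip Prod.mk entradas targets hlen]
  have hz' : ∀ p ∈ (entradas.zip targets).map (fun p => (p.1, p.2)), 3 ≤ p.1.length := by
    intro p hp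
    obtain ⟨q, hq, rfl⟩ := List.mem_map.mp hp
    exact hz q hq
  rw [hebbRec_char _ hz']
  simp only [treinar_hebb, quad_foldl_split_gen, zero_add, bind_pure_comp, List.map_eq_map,
    List.map_map, Function.comp_def]
  have key : ∀ (F G : List Int → Int → Int),
      (∀ p ∈ entradas.zip targets, F p.1 p.2 = G p.1 p.2) →
      ((List.range entradas.length).map
        (fun (a : Nat) => F ((PySem.List.pyGet? entradas (a : Int)).getD [])
                    ((PySem.List.pyGet? targets (a : Int)).getD 0))).sum
      = ((entradas.zip targets).map (fun p => G p.1 p.2)).sum := by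
    intro F G hFG
    rw [map_range_eq_map_zip F entradas targets hlen]
    exact congrArg List.sum (List.map_congr_left hFG)
  refine congrArg₂ _ ?_ ?_
  · refine congrArg₂ _ ?_ (congrArg₂ _ ?_ (congrArg₂ _ ?_ rfl))
    · exact key (fun x t => ((PySem.List.pyGet? x 0).getD 0) * t) (fun x t => (x.getD 0 0) * t)
        (fun p hp => by beta_reduce; rw [(pyGet_row p.1 (hz p hp)).1])
    · exact key (fun x t => ((PySem.List.pyGet? x 1).getD 0) * t) (fun x t => (x.getD 1 0) * t)
        (fun p hp => by beta_reduce; rw [(pyGet_row p.1 (hz p hp)).2.1])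
    · exact key (fun x t => ((PySem.List.pyGet? x 2).getD 0) * t) (fun x t => (x.getD 2 0) * t)
        (fun p hp => by beta_reduce; rw [(pyGet_row p.1 (hz p hp)).2.2])
  · exact key (fun _ t => t) (fun _ t => t) (fun _ _ => rfl)
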